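-- pv_equiv track=rewrite | github.com/minanagehsalalma/youtube-to-article-images-gifs | main.py | _segment_index_for_offset
-- ===== SOURCE A (Python) =====
-- def _segment_index_for_offset(transcript: list[dict], i: int, window_size: int, char_offset: int) -> int:
--     acc = 0
--     for j in range(i, min(len(transcript), i + window_size)):
--         seg_text = str(transcript[j].get("text", ""))
--         seg_len = len(seg_text) + 1
--         if acc <= char_offset < acc + seg_len:
--             return j
--         acc += seg_len
--     return i
-- ===== SOURCE B (Python) =====
-- def _segment_index_for_offset(transcript: list[dict], i: int, window_size: int, char_offset: int) -> int:
--     # Two-phase: build the prefix-sum table of segment start offsets, then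
--     # binary-search it for the segment containing char_offset.
--     end = min(len(transcript), i + window_size)
--     starts = [0]
--     acc = 0
--     for j in range(i, end):
--         acc += len(str(transcript[j].get("text", ""))) + 1
--         starts.append(acc)
--     total = starts[-1]
--     if total == 0 or char_offset < 0 or char_offset >= total:
--         return i
--     # invariant: starts[lo] <= char_offset < starts[hi]
--     lo, hi = 0, len(starts) - 1
--     while hi - lo > 1:
--         mid = (lo + hi) // 2
--         if starts[mid] <= char_offset:
--             lo = mid
--         else:
--             hi = mid
--     return i + lo
-- ===== Notes on version B (the rewrite author's own statement) =====
-- stated objective: alternative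
-- what changed: Replaced A's single accumulate-and-early-return scan by a two-phase algorithm: build the full prefix-sum table of segment start offsets, guard the out-of-range cases, then locate the containing segment with a hand-written binary search over the table.
import Mathlib
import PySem

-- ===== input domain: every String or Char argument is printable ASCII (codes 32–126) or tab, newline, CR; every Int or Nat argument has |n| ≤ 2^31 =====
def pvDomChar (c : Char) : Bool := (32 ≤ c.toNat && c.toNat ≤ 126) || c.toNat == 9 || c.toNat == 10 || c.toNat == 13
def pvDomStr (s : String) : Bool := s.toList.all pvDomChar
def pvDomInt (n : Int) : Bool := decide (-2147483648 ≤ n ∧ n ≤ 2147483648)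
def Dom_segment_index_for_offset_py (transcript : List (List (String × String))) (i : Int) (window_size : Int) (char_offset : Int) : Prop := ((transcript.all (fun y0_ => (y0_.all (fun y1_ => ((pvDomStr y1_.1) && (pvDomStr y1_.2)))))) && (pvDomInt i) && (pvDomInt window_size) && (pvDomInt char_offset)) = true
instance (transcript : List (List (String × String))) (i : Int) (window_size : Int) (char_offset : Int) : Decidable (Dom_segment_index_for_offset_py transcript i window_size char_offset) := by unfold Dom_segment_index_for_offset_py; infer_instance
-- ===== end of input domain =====

-- B rebuilds the answer as a prefix-sum table searched by a hand-written binary search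
-- instead of A's single accumulate-and-test scan (objective: alternative decomposition, not speed).

-- ===== PORT A =====
-- the for-loop of A: early 'return j' on a hit, else accumulate; falls through to 'return i'
def segA_loop (transcript : List (List (String × String))) (char_offset i : Int) : List Int → Int → Int
  | [], _acc => i
  | j :: rest, acc =>
    let seg : List (String × String) := (PySem.List.pyGet? transcript j).getD []  -- transcript[j]; in range under Pre_
    let seg_text : String := (seg.lookup "text").getD ""   -- seg.get("text", ""); str() is identity on str values
    let seg_len : Int := PySem.Str.len seg_text + 1
    if acc ≤ char_offset ∧ char_offset < acc + seg_len then j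
    else segA_loop transcript char_offset i rest (acc + seg_len)

def segment_index_for_offset_py (transcript : List (List (String × String))) (i : Int) (window_size : Int) (char_offset : Int) : Int :=
  segA_loop transcript char_offset i
    (PySem.List.pyRange i (min (PySem.List.len transcript) (i + window_size)) 1) 0

-- ===== PORT B =====
-- phase 1 of B: the loop appending running prefix sums to 'starts' (built head-first here,
-- cons-then-recurse produces the same left-to-right list the Python append loop does)
def segB_starts (transcript : List (List (String × String))) : List Int → Int → List Int
  | [], _acc => []
  | j :: rest, acc =>
    let a := acc + (PySem.Str.len (((((PySem.List.pyGet? transcript j).getD []).lookup "text").getD "")) + 1)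
    a :: segB_starts transcript rest a

-- phase 2 of B: the while-loop binary search; invariant starts[lo] <= c < starts[hi]
def segB_bs (starts : List Int) (c : Int) (lo hi : Int) : Int :=
  if _h : hi - lo > 1 then
    let mid := PySem.Int.floordiv (lo + hi) 2
    if PySem.List.pyGetD starts mid 0 ≤ c then segB_bs starts c mid hi
    else segB_bs starts c lo mid
  else lo
termination_by (hi - lo).toNat
decreasing_by
  all_goals
    simp only [PySem.Int.floordiv, Int.fdiv_eq_ediv] at *
    simp at *
    omega

def segment_index_for_offset_py_alt (transcript : List (List (String × String))) (i : Int) (window_size : Int) (char_offset : Int) : Int :=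
  let e := min (PySem.List.len transcript) (i + window_size)
  let starts := 0 :: segB_starts transcript (PySem.List.pyRange i e 1) 0
  let total := PySem.List.pyGetD starts (-1) 0
  if total = 0 ∨ char_offset < 0 ∨ total ≤ char_offset then i
  else i + segB_bs starts char_offset 0 (PySem.List.len starts - 1)

-- ===== PRECONDITION & SPEC =====
-- Pre_ excludes exactly the inputs where A raises IndexError: a nonempty window starting
-- at i < -len(transcript) (the first access transcript[i] is out of range even after
-- Python's negative-index wraparound).  On every input where A returns, Pre_ holds.
def Pre_segment_index_for_offset_py (transcript : List (List (String × String))) (i : Int) (window_size : Int) (char_offset : Int) : Prop :=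
  min ((transcript.length : Int)) (i + window_size) ≤ i ∨ -((transcript.length : Int)) ≤ i
instance (transcript : List (List (String × String))) (i : Int) (window_size : Int) (char_offset : Int) : Decidable (Pre_segment_index_for_offset_py transcript i window_size char_offset) := by unfold Pre_segment_index_for_offset_py; infer_instance

def pvWitness_segment_index_for_offset_py : (List (List (String × String))) × Int × Int × Int :=
  ([[("text", "ab")], [("text", "c")]], 0, 5, 3)

def Spec_segment_index_for_offset_py (transcript : List (List (String × String))) (i : Int) (window_size : Int) (char_offset : Int) (out : Int) : Prop := out = segment_index_for_offset_py_alt transcript i window_size char_offset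
instance (transcript : List (List (String × String))) (i : Int) (window_size : Int) (char_offset : Int) (out : Int) : Decidable (Spec_segment_index_for_offset_py transcript i window_size char_offset out) := by unfold Spec_segment_index_for_offset_py; infer_instance

-- ===== CLAIM (what is proved, stated in full; the proofs are below) =====
def Claim_equal_segment_index_for_offset_py : Prop := ∀ (transcript : List (List (String × String))) (i : Int) (window_size : Int) (char_offset : Int), Dom_segment_index_for_offset_py transcript i window_size char_offset → Pre_segment_index_for_offset_py transcript i window_size char_offset → Spec_segment_index_for_offset_py transcript i window_size char_offset (segment_index_for_offset_py transcript i window_size char_offset)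

-- ===== LEMMAS AND PROOFS =====

-- per-index segment length (the common 'len(str(seg.get("text","")))+1' of both sources)
def pvSegLen (transcript : List (List (String × String))) (j : Int) : Int :=
  PySem.Str.len ((((PySem.List.pyGet? transcript j).getD []).lookup "text").getD "") + 1

lemma pvSegLen_pos (transcript : List (List (String × String))) (j : Int) : 1 ≤ pvSegLen transcript j := by
  unfold pvSegLen
  have h : 0 ≤ PySem.Str.len ((((PySem.List.pyGet? transcript j).getD []).lookup "text").getD "") := by
    simp [PySem.Str.len_eq]
  omega

-- abstract linear scan over the list of segment lengths (what A's loop computes)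
def pvLinA (c : Int) : List Int → Int → Option Nat
  | [], _acc => none
  | l :: ls, acc => if acc ≤ c ∧ c < acc + l then some 0 else (pvLinA c ls (acc + l)).map (· + 1)

-- abstract prefix sums (what B's first loop computes)
def pvPrefixes : List Int → Int → List Int
  | [], _acc => []
  | l :: ls, acc => (acc + l) :: pvPrefixes ls (acc + l)

lemma segA_loop_eq_linA (transcript : List (List (String × String))) (c i : Int) :
    ∀ (js : List Int) (acc : Int),
      segA_loop transcript c i js acc =
        match pvLinA c (js.map (pvSegLen transcript)) acc with
        | some p => js.getD p 0
        | none => i := by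
  intro js
  induction js with
  | nil => intro acc; simp [segA_loop, pvLinA]
  | cons j rest ih =>
    intro acc
    simp only [segA_loop, List.map_cons, pvLinA]
    rw [show (PySem.Str.len ((List.lookup "text" ((PySem.List.pyGet? transcript j).getD [])).getD "") + 1) = pvSegLen transcript j from rfl]
    by_cases h : acc ≤ c ∧ c < acc + pvSegLen transcript j
    · rw [if_pos h, if_pos]
      · simp
      · exact h
    · rw [if_neg h, if_neg h, ih (acc + pvSegLen transcript j)]
      cases hl : pvLinA c (rest.map (pvSegLen transcript)) (acc + pvSegLen transcript j) with
      | none => simp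
      | some p => simp

lemma segB_starts_eq_prefixes (transcript : List (List (String × String))) :
    ∀ (js : List Int) (acc : Int),
      segB_starts transcript js acc = pvPrefixes (js.map (pvSegLen transcript)) acc := by
  intro js
  induction js with
  | nil => intro acc; simp [segB_starts, pvPrefixes]
  | cons j rest ih =>
    intro acc
    simp only [segB_starts, List.map_cons, pvPrefixes]
    rw [show (PySem.Str.len ((List.lookup "text" ((PySem.List.pyGet? transcript j).getD [])).getD "") + 1) = pvSegLen transcript j from rfl]
    rw [ih]

lemma length_pvPrefixes : ∀ (lens : List Int) (acc : Int), (pvPrefixes lens acc).length = lens.length := by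
  intro lens
  induction lens with
  | nil => intro acc; simp [pvPrefixes]
  | cons l ls ih => intro acc; simp [pvPrefixes, ih]

lemma getElem?_starts : ∀ (lens : List Int) (acc : Int) (k : Nat), k ≤ lens.length →
    (acc :: pvPrefixes lens acc)[k]? = some (acc + (lens.take k).sum) := by
  intro lens
  induction lens with
  | nil =>
    intro acc k hk
    simp only [List.length_nil, Nat.le_zero] at hk
    subst hk
    simp [pvPrefixes]
  | cons l ls ih =>
    intro acc k hk
    cases k with
    | zero => simp
    | succ m =>
      simp only [pvPrefixes, List.getElem?_cons_succ]
      rw [ih (acc + l) m (by simpa using hk)]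
      simp only [List.take_succ_cons, List.sum_cons, Option.some.injEq]
      ring

lemma pyGetD_starts_last : ∀ (lens : List Int) (acc : Int),
    PySem.List.pyGetD (acc :: pvPrefixes lens acc) (-1) 0 = acc + lens.sum := by
  intro lens
  induction lens with
  | nil =>
    intro acc
    rw [PySem.List.pyGetD_neg_one _ _ (List.cons_ne_nil _ _)]
    simp [pvPrefixes]
  | cons l ls ih =>
    intro acc
    rw [PySem.List.pyGetD_neg_one _ _ (List.cons_ne_nil _ _)]
    simp only [pvPrefixes]
    rw [List.getLast_cons (List.cons_ne_nil _ _)]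
    rw [← PySem.List.pyGetD_neg_one _ _ (List.cons_ne_nil _ _), ih (acc + l)]
    simp only [List.sum_cons]
    ring

lemma linA_eq_some (c : Int) : ∀ (lens : List Int) (acc : Int) (p : Nat),
    (∀ l ∈ lens, 1 ≤ l) → p < lens.length →
    acc + (lens.take p).sum ≤ c → c < acc + (lens.take (p + 1)).sum →
    pvLinA c lens acc = some p := by
  intro lens
  induction lens with
  | nil => intro acc p _ hp _ _; simp at hp
  | cons l ls ih =>
    intro acc p hpos hp hlow hhigh
    cases p with
    | zero =>
      simp only [List.take_zero, List.sum_nil, add_zero] at hlow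
      simp only [List.take_succ_cons, List.take_zero, List.sum_cons, List.sum_nil, add_zero] at hhigh
      simp only [pvLinA]
      rw [if_pos ⟨hlow, hhigh⟩]
    | succ q =>
      have hnn : 0 ≤ (ls.take q).sum := by
        apply List.sum_nonneg
        intro x hx
        have := hpos x (List.mem_cons_of_mem _ (List.mem_of_mem_take hx))
        omega
      simp only [List.take_succ_cons, List.sum_cons] at hlow hhigh
      simp only [pvLinA]
      rw [if_neg (by omega)]
      rw [ih (acc + l) q (fun x hx => hpos x (List.mem_cons_of_mem _ hx))
            (by simpa using hp) (by omega) (by omega)]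
      rfl

lemma linA_none_low (c : Int) : ∀ (lens : List Int) (acc : Int),
    (∀ l ∈ lens, 1 ≤ l) → c < acc → pvLinA c lens acc = none := by
  intro lens
  induction lens with
  | nil => intro acc _ _; rfl
  | cons l ls ih =>
    intro acc hpos hlt
    have hl := hpos l List.mem_cons_self
    simp only [pvLinA]
    rw [if_neg (by omega), ih (acc + l) (fun x hx => hpos x (List.mem_cons_of_mem _ hx)) (by omega)]
    rfl

lemma linA_none_high (c : Int) : ∀ (lens : List Int) (acc : Int),
    (∀ l ∈ lens, 1 ≤ l) → acc + lens.sum ≤ c → pvLinA c lens acc = none := by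
  intro lens
  induction lens with
  | nil => intro acc _ _; rfl
  | cons l ls ih =>
    intro acc hpos hle
    have hnn : 0 ≤ ls.sum := by
      apply List.sum_nonneg
      intro x hx
      have := hpos x (List.mem_cons_of_mem _ hx)
      omega
    simp only [List.sum_cons] at hle
    simp only [pvLinA]
    rw [if_neg (by omega), ih (acc + l) (fun x hx => hpos x (List.mem_cons_of_mem _ hx)) (by omega)]
    rfl

-- binary-search invariant: the result p satisfies lo ≤ p < hi and starts[p] ≤ c < starts[p+1]
lemma segB_bs_spec (starts : List Int) (c : Int) :
    ∀ (k : Nat) (lo hi : Int), (hi - lo).toNat = k →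
      0 ≤ lo → lo < hi → hi < (starts.length : Int) →
      PySem.List.pyGetD starts lo 0 ≤ c → c < PySem.List.pyGetD starts hi 0 →
      lo ≤ segB_bs starts c lo hi ∧ segB_bs starts c lo hi < hi ∧
      PySem.List.pyGetD starts (segB_bs starts c lo hi) 0 ≤ c ∧
      c < PySem.List.pyGetD starts (segB_bs starts c lo hi + 1) 0 := by
  intro k
  induction k using Nat.strong_induction_on with
  | _ k ih =>
    intro lo hi hk h0 hlh hhilen hlov hhiv
    rw [segB_bs]
    by_cases hgt : hi - lo > 1
    · rw [dif_pos hgt]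
      have hmid' : 2 * PySem.Int.floordiv (lo + hi) 2 ≤ lo + hi ∧
          lo + hi < 2 * PySem.Int.floordiv (lo + hi) 2 + 2 := by
        simp only [PySem.Int.floordiv, Int.fdiv_eq_ediv]
        simp
        omega
      set mid := PySem.Int.floordiv (lo + hi) 2 with hmid
      have hlomid : lo < mid := by omega
      have hmidhi : mid < hi := by omega
      by_cases hc : PySem.List.pyGetD starts mid 0 ≤ c
      · rw [if_pos hc]
        have h := ih (hi - mid).toNat (by omega) mid hi rfl (by omega) hmidhi hhilen hc hhiv
        exact ⟨by omega, h.2.1, h.2.2.1, h.2.2.2⟩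
      · rw [if_neg hc]
        push_neg at hc
        have h := ih (mid - lo).toNat (by omega) lo mid rfl h0 hlomid (by omega) hlov hc
        exact ⟨h.1, by omega, h.2.2.1, h.2.2.2⟩
    · rw [dif_neg hgt]
      have heq : hi = lo + 1 := by omega
      exact ⟨le_refl _, by omega, hlov, by rw [← heq]; exact hhiv⟩

-- ===== VERDICT (by name: the statement is the Claim_ definition above) =====
theorem segment_index_for_offset_py_spec : Claim_equal_segment_index_for_offset_py := by
  intro transcript i window_size char_offset _hdom _hpre
  unfold Spec_segment_index_for_offset_py
  simp only [segment_index_for_offset_py, segment_index_for_offset_py_alt, PySem.List.len_eq]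
  rw [segB_starts_eq_prefixes]
  set e := min ((transcript.length : Int)) (i + window_size) with he
  set js := PySem.List.pyRange i e 1 with hjs
  set lens := js.map (pvSegLen transcript) with hlens
  have hpos : ∀ l ∈ lens, 1 ≤ l := by
    intro l hl
    rw [hlens] at hl
    simp only [List.mem_map] at hl
    obtain ⟨j, _, rfl⟩ := hl
    exact pvSegLen_pos transcript j
  set starts := (0 : Int) :: pvPrefixes lens 0 with hst
  have hlenst : starts.length = lens.length + 1 := by rw [hst]; simp [length_pvPrefixes]
  have htot : PySem.List.pyGetD starts (-1) 0 = lens.sum := by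
    rw [hst, pyGetD_starts_last]
    ring
  rw [htot]
  rw [segA_loop_eq_linA]
  rw [← hlens]
  by_cases hguard : lens.sum = 0 ∨ char_offset < 0 ∨ lens.sum ≤ char_offset
  · rw [if_pos hguard]
    have hnone : pvLinA char_offset lens 0 = none := by
      rcases hguard with h0 | hneg | hhigh
      · rcases hlscase : lens with _ | ⟨l, ls⟩
        · rfl
        · exfalso
          rw [hlscase] at h0 hpos
          have h1 := hpos l List.mem_cons_self
          have h2 : 0 ≤ ls.sum := by
            apply List.sum_nonneg
            intro x hx
            have := hpos x (List.mem_cons_of_mem _ hx)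
            omega
          simp only [List.sum_cons] at h0
          omega
      · exact linA_none_low _ _ _ hpos (by omega)
      · exact linA_none_high _ _ _ hpos (by omega)
    rw [hnone]
  · rw [if_neg hguard]
    push_neg at hguard
    obtain ⟨hne0, hcnn, hclt⟩ := hguard
    have hlen1 : 1 ≤ lens.length := by
      rcases hlscase : lens with _ | ⟨l, ls⟩
      · rw [hlscase] at hne0; simp at hne0
      · simp
    have hget : ∀ (k : Nat), k ≤ lens.length → PySem.List.pyGetD starts (k : Int) 0 = (lens.take k).sum := by
      intro k hk
      rw [PySem.List.pyGetD_natCast]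
      rw [hst, List.getD_eq_getElem?_getD, getElem?_starts lens 0 k hk]
      simp
    have hbig : ((starts.length : Int) - 1) = (lens.length : Int) := by
      rw [hlenst]; push_cast; ring
    rw [hbig]
    have hsumnn : 0 ≤ lens.sum := by
      apply List.sum_nonneg
      intro x hx
      have := hpos x hx
      omega
    have hspec := segB_bs_spec starts char_offset lens.length 0 (lens.length)
      (by simp) (le_refl 0) (by exact_mod_cast hlen1) (by rw [hlenst]; push_cast; omega)
      (by have h0 := hget 0 (Nat.zero_le _)
          simp only [Nat.cast_zero, List.take_zero, List.sum_nil] at h0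
          rw [h0]; exact hcnn)
      (by rw [hget lens.length (le_refl _)]; simpa [List.take_length] using hclt)
    set p := segB_bs starts char_offset 0 (lens.length : Int) with hp
    obtain ⟨hp0, hplt, hpc1, hpc2⟩ := hspec
    set q := p.toNat with hq
    have hpq : (q : Int) = p := Int.toNat_of_nonneg hp0
    have hqlt : q < lens.length := by omega
    rw [← hpq] at hpc1 hpc2
    rw [hget q (by omega)] at hpc1
    rw [show ((q : Int) + 1) = (((q + 1 : Nat)) : Int) by push_cast; ring, hget (q + 1) (by omega)] at hpc2
    have hsome : pvLinA char_offset lens 0 = some q :=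
      linA_eq_some _ _ _ _ hpos hqlt (by omega) (by omega)
    rw [hsome]
    show js.getD q 0 = i + p
    have hjlen : q < js.length := by
      rw [hlens] at hqlt
      simpa using hqlt
    have hjlen' : q < (PySem.List.pyRange i e 1).length := hjlen
    rw [List.getD_eq_getElem?_getD, hjs, List.getElem?_eq_getElem hjlen']
    simp only [Option.getD_some]
    rw [PySem.List.getElem_pyRange_one]
    omega
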